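-- pv_equiv track=rewrite | github.com/NJUOCR/universal_cnn | utils/projection.py | get_splitter
-- ===== SOURCE A (Python) =====
-- def get_splitter(sum_array):
--     splitters = []
--     for i in range(1, len(sum_array) - 1):
--         left, cur, right = sum_array[i - 1:i + 2]
--         if cur == left == right:
--             continue
--         if cur <= min(left, right):
--             splitters.append(i)
--     return splitters
-- ===== SOURCE B (Python) =====
-- def get_splitter(sum_array):
--     # plateau-run scan: consume the array one run (maximal block of equal
--     # values) at a time; only a run's first and last index can be a splitter,
--     # so plateau interiors are skipped wholesale instead of tested per index.
--     n = len(sum_array)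
--     out = []
--     prev = None
--     i = 0
--     while i < n:
--         v = sum_array[i]
--         j = i + 1
--         while j < n and sum_array[j] == v:
--             j += 1
--         ln = j - i
--         if prev is not None and v < prev and (ln > 1 or (j < n and v < sum_array[j])):
--             out.append(i)
--         if ln > 1 and j < n and v < sum_array[j]:
--             out.append(i + ln - 1)
--         prev = v
--         i = j
--     return out
-- ===== Notes on version B (the rewrite author's own statement) =====
-- stated objective: alternative
-- what changed: B run-length-decomposes the array: it consumes one maximal plateau (run of equal values) at a time and emits only the run's first/last index when the run sits below its neighbouring runs, skipping plateau interiors wholesale, instead of slicing and testing the [left, cur, right] triple at every interior index.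
import Mathlib
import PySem

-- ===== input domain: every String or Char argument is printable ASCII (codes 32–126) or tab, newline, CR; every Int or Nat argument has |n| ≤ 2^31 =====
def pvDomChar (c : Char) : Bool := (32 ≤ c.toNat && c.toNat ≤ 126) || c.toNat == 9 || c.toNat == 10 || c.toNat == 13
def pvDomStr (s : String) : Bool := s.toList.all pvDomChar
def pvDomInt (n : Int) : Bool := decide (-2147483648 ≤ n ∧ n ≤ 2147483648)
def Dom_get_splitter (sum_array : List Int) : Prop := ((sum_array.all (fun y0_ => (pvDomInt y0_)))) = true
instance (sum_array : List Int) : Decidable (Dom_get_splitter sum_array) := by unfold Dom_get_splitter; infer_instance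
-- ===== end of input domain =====

-- B scans the array one plateau-run at a time instead of testing every index's neighbour triple; return values proved equal on all inputs.

-- ===== PORT A =====
-- A slices the raw triple [left, cur, right] out of the array for each interior index.
def get_splitter (sum_array : List Int) : List Int :=
  (PySem.List.pyRange 1 ((sum_array.length : Int) - 1) 1).foldl
    (fun splitters i =>
      match PySem.List.slice sum_array (some (i - 1)) (some (i + 2)) with
      | [left, cur, right] =>
          if cur = left ∧ left = right then splitters
          else if cur ≤ min left right then splitters ++ [i]
          else splitters
      | _ => splitters)   -- unreachable: the slice has exactly 3 elements for every i in the range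
    []

-- ===== PORT B =====
-- Source B's split_run: count of further leading elements equal to v, and the remainder
def splitRunAux (v : Int) : List Int → Nat × List Int
  | [] => (0, [])
  | x :: t => if x = v then ((splitRunAux v t).1 + 1, (splitRunAux v t).2) else (0, x :: t)

-- needed by loopB's termination; cited by name in decreasing_by
lemma splitRunAux_length (v : Int) (t : List Int) : (splitRunAux v t).2.length ≤ t.length := by
  induction t with
  | nil => simp [splitRunAux]
  | cons x t ih =>
    by_cases h : x = v <;> simp [splitRunAux, h] <;> omega

-- 'if prev is not None and v < prev and (ln > 1 or (rest and v < rest[0])): out.append(pos)'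
def emitStart (prev : Option Int) (v pos : Int) (k : Nat) (r : List Int) (acc : List Int) : List Int :=
  if (match prev with | some p => decide (v < p) | none => false)
     && (decide ((1 : Int) < (k : Int) + 1) || (match r with | x :: _ => decide (v < x) | [] => false))
  then acc ++ [pos] else acc

-- 'if ln > 1 and rest and v < rest[0]: out.append(pos + ln - 1)'
def emitEnd (v pos : Int) (k : Nat) (r : List Int) (acc : List Int) : List Int :=
  if decide ((1 : Int) < (k : Int) + 1) && (match r with | x :: _ => decide (v < x) | [] => false)
  then acc ++ [pos + ((k : Int) + 1) - 1] else acc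

-- Source B's while-loop over runs: state (prev, pos, out); split_run gives (ln, rest) = (k+1, (splitRunAux v t).2)
def loopB (prev : Option Int) (pos : Int) (acc : List Int) : List Int → List Int
  | [] => acc
  | v :: t =>
    loopB (some v) (pos + (((splitRunAux v t).1 : Int) + 1))
      (emitEnd v pos (splitRunAux v t).1 (splitRunAux v t).2
        (emitStart prev v pos (splitRunAux v t).1 (splitRunAux v t).2 acc))
      (splitRunAux v t).2
termination_by ys => ys.length
decreasing_by exact Nat.lt_succ_of_le (splitRunAux_length v t)

def get_splitter_alt (sum_array : List Int) : List Int :=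
  loopB none 0 [] sum_array

-- ===== PRECONDITION & SPEC =====
def Spec_get_splitter (sum_array : List Int) (out : List Int) : Prop := out = get_splitter_alt sum_array
instance (sum_array : List Int) (out : List Int) : Decidable (Spec_get_splitter sum_array out) := by unfold Spec_get_splitter; infer_instance

-- ===== CLAIM (what is proved, stated in full; the proofs are below) =====
def Claim_equal_get_splitter : Prop := ∀ (sum_array : List Int), Dom_get_splitter sum_array → Spec_get_splitter sum_array (get_splitter sum_array)

-- ===== LEMMAS AND PROOFS =====
set_option maxRecDepth 10000

-- contribution of index i in A's loop
def gA (xs : List Int) (i : Int) : List Int :=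
  match PySem.List.slice xs (some (i - 1)) (some (i + 2)) with
  | [left, cur, right] =>
      if cur = left ∧ left = right then []
      else if cur ≤ min left right then [i]
      else []
  | _ => []

-- common structural specification: relative valley positions
def specList : List Int → List Int
  | l :: c :: r :: rest =>
      (if c = l ∧ l = r then [] else if c ≤ min l r then [(1 : Int)] else [])
        ++ (specList (c :: r :: rest)).map (· + 1)
  | _ => []

lemma foldl_gA (xs : List Int) (l : List Int) (acc : List Int) :
    l.foldl
      (fun splitters i =>
        match PySem.List.slice xs (some (i - 1)) (some (i + 2)) with
        | [left, cur, right] =>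
            if cur = left ∧ left = right then splitters
            else if cur ≤ min left right then splitters ++ [i]
            else splitters
        | _ => splitters) acc
      = acc ++ l.flatMap (gA xs) := by
  induction l generalizing acc with
  | nil => simp
  | cons i l ih =>
    rw [List.foldl_cons, ih, List.flatMap_cons]
    have hstep : (match PySem.List.slice xs (some (i - 1)) (some (i + 2)) with
        | [left, cur, right] =>
            if cur = left ∧ left = right then acc
            else if cur ≤ min left right then acc ++ [i]
            else acc
        | _ => acc) = acc ++ gA xs i := by
      unfold gA
      rcases PySem.List.slice xs (some (i - 1)) (some (i + 2)) with _ | ⟨a, _ | ⟨b, _ | ⟨c, _ | ⟨d, t⟩⟩⟩⟩ <;>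
        simp <;> split_ifs <;> simp
    rw [hstep, List.append_assoc]

lemma gA_shift_nat (x : Int) (xs : List Int) (k : Nat) :
    gA (x :: xs) (2 + (k : Int)) = (gA xs (1 + (k : Int))).map (· + 1) := by
  unfold gA
  have h1 : PySem.List.slice (x :: xs) (some (2 + (k : Int) - 1)) (some (2 + (k : Int) + 2)) =
      ((x :: xs).drop (1 + k)).take 3 := by
    have e1 : (2 + (k : Int) - 1) = ((1 + k : Nat) : Int) := by push_cast; ring
    rw [e1]
    have e2 : (2 + (k : Int) + 2) = ((1 + k : Nat) : Int) + ((3 : Nat) : Int) := by push_cast; ring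
    rw [e2, PySem.List.slice_natCast_add]
  have h2 : PySem.List.slice xs (some (1 + (k : Int) - 1)) (some (1 + (k : Int) + 2)) =
      (xs.drop k).take 3 := by
    have e1 : (1 + (k : Int) - 1) = ((k : Nat) : Int) := by omega
    rw [e1]
    have e2 : (1 + (k : Int) + 2) = ((k : Nat) : Int) + ((3 : Nat) : Int) := by push_cast; ring
    rw [e2, PySem.List.slice_natCast_add]
  rw [h1, h2]
  have hd : (x :: xs).drop (1 + k) = xs.drop k := by
    rw [Nat.add_comm]; simp [List.drop_succ_cons]
  rw [hd]
  rcases (xs.drop k).take 3 with _ | ⟨a, _ | ⟨b, _ | ⟨c, _ | ⟨d, t⟩⟩⟩⟩ <;>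
    simp <;> split_ifs <;> simp <;> ring

lemma gA_shift (x : Int) (xs : List Int) (i : Int) (hi : 1 ≤ i) :
    gA (x :: xs) (i + 1) = (gA xs i).map (· + 1) := by
  obtain ⟨k, rfl⟩ : ∃ k : Nat, i = 1 + (k : Int) := ⟨(i - 1).toNat, by omega⟩
  have e : (1 + (k : Int) + 1) = 2 + (k : Int) := by ring
  rw [e, gA_shift_nat]

lemma gA_one (x c r : Int) (rest : List Int) :
    gA (x :: c :: r :: rest) 1 =
      (if c = x ∧ x = r then [] else if c ≤ min x r then [(1 : Int)] else []) := by
  unfold gA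
  have h : PySem.List.slice (x :: c :: r :: rest) (some (1 - 1)) (some (1 + 2)) = [x, c, r] := by
    have e1 : (1 - 1 : Int) = ((0 : Nat) : Int) := by norm_num
    have e2 : (1 + 2 : Int) = ((0 : Nat) : Int) + ((3 : Nat) : Int) := by norm_num
    rw [e1, e2, PySem.List.slice_natCast_add]
    simp
  rw [h]

lemma pyRange_shift (a b : Int) :
    PySem.List.pyRange (a + 1) (b + 1) 1 = (PySem.List.pyRange a b 1).map (· + 1) := by
  rw [PySem.List.pyRange_one, PySem.List.pyRange_one, List.map_map]
  have e : (b + 1 - (a + 1)) = b - a := by ring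
  rw [e]
  apply List.map_congr_left
  intro k _
  simp
  ring

lemma A_eq_spec (xs : List Int) :
    (PySem.List.pyRange 1 ((xs.length : Int) - 1) 1).flatMap (gA xs) = specList xs := by
  induction xs with
  | nil => simp [PySem.List.pyRange_one_eq_nil, specList]
  | cons x xs ih =>
    match xs with
    | [] => simp [PySem.List.pyRange_one_eq_nil, specList]
    | [a] =>
      have e : ((([x, a] : List Int).length : Int) - 1) = 1 := by simp
      rw [e, PySem.List.pyRange_one_eq_nil le_rfl]
      simp [specList]
    | c :: r :: rest =>
      have hn : (1 : Int) < ((x :: c :: r :: rest).length : Int) - 1 := by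
        simp only [List.length_cons]; push_cast; omega
      rw [PySem.List.pyRange_one_cons hn, List.flatMap_cons]
      have hlen : ((x :: c :: r :: rest).length : Int) - 1 = (((c :: r :: rest).length : Int) - 1) + 1 := by
        simp only [List.length_cons]; push_cast; ring
      have h2 : (1 + 1 : Int) = (1 : Int) + 1 := rfl
      rw [hlen, h2, pyRange_shift, List.flatMap_map]
      have hshift : ∀ i ∈ PySem.List.pyRange 1 (((c :: r :: rest).length : Int) - 1) 1,
          gA (x :: c :: r :: rest) (i + 1) = (gA (c :: r :: rest) i).map (· + 1) := by
        intro i hi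
        have := (PySem.List.mem_pyRange_one.mp hi).1
        exact gA_shift x (c :: r :: rest) i this
      rw [List.flatMap_congr hshift, ← List.map_flatMap, ih, gA_one]
      rfl

-- ---- B side: run lemmas about specList ----

lemma splitRunAux_decompose (v : Int) (t : List Int) :
    t = List.replicate (splitRunAux v t).1 v ++ (splitRunAux v t).2 := by
  induction t with
  | nil => simp [splitRunAux]
  | cons x t ih =>
    by_cases h : x = v
    · have he : splitRunAux v (x :: t) = ((splitRunAux v t).1 + 1, (splitRunAux v t).2) := by
        simp [splitRunAux, h]
      rw [he, h]
      rw [show ((splitRunAux v t).1 + 1, (splitRunAux v t).2).1 = (splitRunAux v t).1 + 1 from rfl]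
      rw [List.replicate_succ, List.cons_append]
      exact congrArg (List.cons v) ih
    · simp [splitRunAux, h]

lemma splitRunAux_head (v : Int) (t : List Int) :
    ∀ x, (splitRunAux v t).2.head? = some x → x ≠ v := by
  induction t with
  | nil => simp [splitRunAux]
  | cons y t ih =>
    by_cases h : y = v
    · simpa [splitRunAux, h] using ih
    · simp [splitRunAux, h]

lemma specList_replicate (k : Nat) (v : Int) : specList (List.replicate k v) = [] := by
  induction k with
  | zero => simp [specList]
  | succ k ih =>
    match k, ih with
    | 0, _ => simp [specList]
    | 1, _ => simp [specList]
    | (m+2), ih =>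
      show specList (v :: v :: v :: List.replicate m v) = []
      rw [specList]
      have h2 : specList (v :: v :: List.replicate m v) = [] := by
        simpa [List.replicate_succ] using ih
      rw [h2]
      simp

lemma map_shift (s : List Int) (a b : Int) :
    (s.map (· + a)).map (· + b) = s.map (· + (a + b)) := by
  rw [List.map_map]
  apply List.map_congr_left
  intro z _
  simp
  ring

lemma runSpecTop (k : Nat) (v n : Int) (t : List Int) (h : n ≠ v) :
    specList (List.replicate (k+1) v ++ n :: t) =
      (if 1 ≤ k ∧ v < n then [(k : Int)] else [])
        ++ (specList (v :: n :: t)).map (· + (k : Int)) := by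
  induction k with
  | zero => simp
  | succ k ih =>
    cases k with
    | zero =>
      show specList (v :: v :: n :: t) = _
      clear ih
      have hne : v ≠ n := fun e => h e.symm
      by_cases hvn : v < n
      · simp [specList, hvn, le_of_lt hvn, hne, le_min_iff]
        all_goals first
          | (refine ⟨trivial, ?_⟩; intro a ha; trivial)
          | (refine ⟨by omega, ?_⟩; intro a ha; omega)
          | (refine ⟨by omega, ?_⟩; intro a ha; push_cast; omega)
          | omega
          | (apply List.map_congr_left; intro z _; push_cast; omega)
          | (refine ⟨by omega, ?_⟩
             apply List.map_congr_left; intro z _; push_cast; omega)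
          | (refine ⟨by omega, by omega, ?_⟩
             apply List.map_congr_left; intro z _; push_cast; omega)
          | (push_cast; omega)
          | (refine ⟨trivial, ?_⟩; intro a ha; trivial)
          | (refine ⟨by omega, ?_⟩; intro a ha; omega)
          | (refine ⟨by omega, ?_⟩; intro a ha; push_cast; omega)
          | rfl
      · simp [specList, hvn, (by omega : ¬ v ≤ n), le_min_iff]
        all_goals first
          | (refine ⟨trivial, ?_⟩; intro a ha; trivial)
          | (refine ⟨by omega, ?_⟩; intro a ha; omega)
          | (refine ⟨by omega, ?_⟩; intro a ha; push_cast; omega)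
          | omega
          | (apply List.map_congr_left; intro z _; push_cast; omega)
          | (refine ⟨by omega, ?_⟩
             apply List.map_congr_left; intro z _; push_cast; omega)
          | (refine ⟨by omega, by omega, ?_⟩
             apply List.map_congr_left; intro z _; push_cast; omega)
          | (push_cast; omega)
          | (refine ⟨trivial, ?_⟩; intro a ha; trivial)
          | (refine ⟨by omega, ?_⟩; intro a ha; omega)
          | (refine ⟨by omega, ?_⟩; intro a ha; push_cast; omega)
          | rfl
    | succ m =>
      show specList (v :: v :: v :: (List.replicate m v ++ n :: t)) = _
      rw [specList, if_pos ⟨rfl, rfl⟩, List.nil_append]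
      have hrec : specList (v :: v :: (List.replicate m v ++ n :: t)) =
          (if 1 ≤ m + 1 ∧ v < n then [((m : Int) + 1)] else [])
            ++ (specList (v :: n :: t)).map (· + ((m : Int) + 1)) := by
        have h0 := ih
        rw [show List.replicate (m+1+1) v ++ n :: t
              = v :: v :: (List.replicate m v ++ n :: t) by simp [List.replicate_succ]] at h0
        simpa using h0
      rw [hrec, List.map_append, map_shift]
      clear hrec ih
      by_cases hvn : v < n
      · simp [hvn, (by omega : (1:Nat) ≤ m + 1)]
        all_goals first
          | (refine ⟨trivial, ?_⟩; intro a ha; trivial)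
          | (refine ⟨by omega, ?_⟩; intro a ha; omega)
          | (refine ⟨by omega, ?_⟩; intro a ha; push_cast; omega)
          | omega
          | (apply List.map_congr_left; intro z _; push_cast; omega)
          | (refine ⟨by omega, ?_⟩
             apply List.map_congr_left; intro z _; push_cast; omega)
          | (refine ⟨by omega, by omega, ?_⟩
             apply List.map_congr_left; intro z _; push_cast; omega)
          | (push_cast; omega)
          | (refine ⟨trivial, ?_⟩; intro a ha; trivial)
          | (refine ⟨by omega, ?_⟩; intro a ha; omega)
          | (refine ⟨by omega, ?_⟩; intro a ha; push_cast; omega)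
          | rfl
      · simp [hvn]
        all_goals first
          | (refine ⟨trivial, ?_⟩; intro a ha; trivial)
          | (refine ⟨by omega, ?_⟩; intro a ha; omega)
          | (refine ⟨by omega, ?_⟩; intro a ha; push_cast; omega)
          | omega
          | (apply List.map_congr_left; intro z _; push_cast; omega)
          | (refine ⟨by omega, ?_⟩
             apply List.map_congr_left; intro z _; push_cast; omega)
          | (refine ⟨by omega, by omega, ?_⟩
             apply List.map_congr_left; intro z _; push_cast; omega)
          | (push_cast; omega)
          | (refine ⟨trivial, ?_⟩; intro a ha; trivial)
          | (refine ⟨by omega, ?_⟩; intro a ha; omega)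
          | (refine ⟨by omega, ?_⟩; intro a ha; push_cast; omega)
          | rfl

lemma runSpecLeftNil (k : Nat) (v p : Int) (hvp : v ≠ p) :
    specList (p :: List.replicate (k+1) v) =
      if 1 ≤ k ∧ v < p then [(1 : Int)] else [] := by
  match k with
  | 0 =>
    show specList [p, v] = _
    rw [if_neg (by omega : ¬ ((1:Nat) ≤ 0 ∧ v < p))]
    rfl
  | (m+1) =>
    show specList (p :: v :: v :: List.replicate m v) = _
    rw [specList]
    have h2 : specList (v :: v :: List.replicate m v) = [] := by
      simpa [List.replicate_succ] using specList_replicate (m+2) v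
    rw [h2, List.map_nil, List.append_nil]
    by_cases hvlt : v < p
    · simp [hvlt, le_of_lt hvlt, hvp, le_min_iff, (by omega : (1:Nat) ≤ m + 1)]
      all_goals first
        | (refine ⟨trivial, ?_⟩; intro a ha; trivial)
        | (refine ⟨by omega, ?_⟩; intro a ha; omega)
        | (refine ⟨by omega, ?_⟩; intro a ha; push_cast; omega)
        | omega
        | (apply List.map_congr_left; intro z _; push_cast; omega)
        | (refine ⟨by omega, ?_⟩
           apply List.map_congr_left; intro z _; push_cast; omega)
        | (refine ⟨by omega, by omega, ?_⟩
           apply List.map_congr_left; intro z _; push_cast; omega)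
        | (push_cast; omega)
        | (refine ⟨trivial, ?_⟩; intro a ha; trivial)
        | (refine ⟨by omega, ?_⟩; intro a ha; omega)
        | (refine ⟨by omega, ?_⟩; intro a ha; push_cast; omega)
        | rfl
    · simp [hvlt, (by omega : ¬ v ≤ p), hvp, le_min_iff]
      all_goals first
        | (refine ⟨trivial, ?_⟩; intro a ha; trivial)
        | (refine ⟨by omega, ?_⟩; intro a ha; omega)
        | (refine ⟨by omega, ?_⟩; intro a ha; push_cast; omega)
        | omega
        | (apply List.map_congr_left; intro z _; push_cast; omega)
        | (refine ⟨by omega, ?_⟩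
           apply List.map_congr_left; intro z _; push_cast; omega)
        | (refine ⟨by omega, by omega, ?_⟩
           apply List.map_congr_left; intro z _; push_cast; omega)
        | (push_cast; omega)
        | (refine ⟨trivial, ?_⟩; intro a ha; trivial)
        | (refine ⟨by omega, ?_⟩; intro a ha; omega)
        | (refine ⟨by omega, ?_⟩; intro a ha; push_cast; omega)
        | rfl

lemma runSpecLeft (k : Nat) (v p n : Int) (t : List Int) (hvp : v ≠ p) (hnv : n ≠ v) :
    specList (p :: (List.replicate (k+1) v ++ n :: t)) =
      (if v < p ∧ (1 ≤ k ∨ v < n) then [(1 : Int)] else [])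
        ++ (if 1 ≤ k ∧ v < n then [(k : Int) + 1] else [])
        ++ (specList (v :: n :: t)).map (· + ((k : Int) + 1)) := by
  match k with
  | 0 =>
    show specList (p :: v :: n :: t) = _
    by_cases hvlt : v < p <;> by_cases hvn : v < n
    · simp [specList, hvlt, hvn, le_of_lt hvlt, le_of_lt hvn, hvp, le_min_iff]
      all_goals first
        | (refine ⟨trivial, ?_⟩; intro a ha; trivial)
        | (refine ⟨by omega, ?_⟩; intro a ha; omega)
        | (refine ⟨by omega, ?_⟩; intro a ha; push_cast; omega)
        | omega
        | (apply List.map_congr_left; intro z _; push_cast; omega)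
        | (refine ⟨by omega, ?_⟩
           apply List.map_congr_left; intro z _; push_cast; omega)
        | (refine ⟨by omega, by omega, ?_⟩
           apply List.map_congr_left; intro z _; push_cast; omega)
        | (push_cast; omega)
        | (refine ⟨trivial, ?_⟩; intro a ha; trivial)
        | (refine ⟨by omega, ?_⟩; intro a ha; omega)
        | (refine ⟨by omega, ?_⟩; intro a ha; push_cast; omega)
        | rfl
    · simp [specList, hvlt, hvn, hvp, le_min_iff, (by omega : ¬ v ≤ n)]
      all_goals first
        | (refine ⟨trivial, ?_⟩; intro a ha; trivial)
        | (refine ⟨by omega, ?_⟩; intro a ha; omega)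
        | (refine ⟨by omega, ?_⟩; intro a ha; push_cast; omega)
        | omega
        | (apply List.map_congr_left; intro z _; push_cast; omega)
        | (refine ⟨by omega, ?_⟩
           apply List.map_congr_left; intro z _; push_cast; omega)
        | (refine ⟨by omega, by omega, ?_⟩
           apply List.map_congr_left; intro z _; push_cast; omega)
        | (push_cast; omega)
        | (refine ⟨trivial, ?_⟩; intro a ha; trivial)
        | (refine ⟨by omega, ?_⟩; intro a ha; omega)
        | (refine ⟨by omega, ?_⟩; intro a ha; push_cast; omega)
        | rfl
    · simp [specList, hvlt, hvn, hvp, le_min_iff, (by omega : ¬ v ≤ p)]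
      all_goals first
        | (refine ⟨trivial, ?_⟩; intro a ha; trivial)
        | (refine ⟨by omega, ?_⟩; intro a ha; omega)
        | (refine ⟨by omega, ?_⟩; intro a ha; push_cast; omega)
        | omega
        | (apply List.map_congr_left; intro z _; push_cast; omega)
        | (refine ⟨by omega, ?_⟩
           apply List.map_congr_left; intro z _; push_cast; omega)
        | (refine ⟨by omega, by omega, ?_⟩
           apply List.map_congr_left; intro z _; push_cast; omega)
        | (push_cast; omega)
        | (refine ⟨trivial, ?_⟩; intro a ha; trivial)
        | (refine ⟨by omega, ?_⟩; intro a ha; omega)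
        | (refine ⟨by omega, ?_⟩; intro a ha; push_cast; omega)
        | rfl
    · simp [specList, hvlt, hvn, hvp, le_min_iff, (by omega : ¬ v ≤ p)]
      all_goals first
        | (refine ⟨trivial, ?_⟩; intro a ha; trivial)
        | (refine ⟨by omega, ?_⟩; intro a ha; omega)
        | (refine ⟨by omega, ?_⟩; intro a ha; push_cast; omega)
        | omega
        | (apply List.map_congr_left; intro z _; push_cast; omega)
        | (refine ⟨by omega, ?_⟩
           apply List.map_congr_left; intro z _; push_cast; omega)
        | (refine ⟨by omega, by omega, ?_⟩
           apply List.map_congr_left; intro z _; push_cast; omega)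
        | (push_cast; omega)
        | (refine ⟨trivial, ?_⟩; intro a ha; trivial)
        | (refine ⟨by omega, ?_⟩; intro a ha; omega)
        | (refine ⟨by omega, ?_⟩; intro a ha; push_cast; omega)
        | rfl
  | (m+1) =>
    show specList (p :: v :: (List.replicate (m+1) v ++ n :: t)) = _
    rw [show List.replicate (m+1) v ++ n :: t = v :: (List.replicate m v ++ n :: t) by
          simp [List.replicate_succ]]
    rw [specList]
    have hrec : specList (v :: v :: (List.replicate m v ++ n :: t)) =
        (if 1 ≤ m + 1 ∧ v < n then [((m : Int) + 1)] else [])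
          ++ (specList (v :: n :: t)).map (· + ((m : Int) + 1)) := by
      have h0 := runSpecTop (m+1) v n t hnv
      rw [show List.replicate (m+1+1) v ++ n :: t
            = v :: v :: (List.replicate m v ++ n :: t) by simp [List.replicate_succ]] at h0
      simpa using h0
    rw [hrec, List.map_append, map_shift]
    clear hrec
    by_cases hvlt : v < p <;> by_cases hvn : v < n
    · simp [hvlt, hvn, le_of_lt hvlt, hvp, le_min_iff, (by omega : (1:Nat) ≤ m + 1)]
      all_goals first
        | (refine ⟨trivial, ?_⟩; intro a ha; trivial)
        | (refine ⟨by omega, ?_⟩; intro a ha; omega)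
        | (refine ⟨by omega, ?_⟩; intro a ha; push_cast; omega)
        | omega
        | (apply List.map_congr_left; intro z _; push_cast; omega)
        | (refine ⟨by omega, ?_⟩
           apply List.map_congr_left; intro z _; push_cast; omega)
        | (refine ⟨by omega, by omega, ?_⟩
           apply List.map_congr_left; intro z _; push_cast; omega)
        | (push_cast; omega)
        | (refine ⟨trivial, ?_⟩; intro a ha; trivial)
        | (refine ⟨by omega, ?_⟩; intro a ha; omega)
        | (refine ⟨by omega, ?_⟩; intro a ha; push_cast; omega)
        | rfl
    · simp [hvlt, hvn, le_of_lt hvlt, hvp, le_min_iff, (by omega : (1:Nat) ≤ m + 1)]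
      all_goals first
        | (refine ⟨trivial, ?_⟩; intro a ha; trivial)
        | (refine ⟨by omega, ?_⟩; intro a ha; omega)
        | (refine ⟨by omega, ?_⟩; intro a ha; push_cast; omega)
        | omega
        | (apply List.map_congr_left; intro z _; push_cast; omega)
        | (refine ⟨by omega, ?_⟩
           apply List.map_congr_left; intro z _; push_cast; omega)
        | (refine ⟨by omega, by omega, ?_⟩
           apply List.map_congr_left; intro z _; push_cast; omega)
        | (push_cast; omega)
        | (refine ⟨trivial, ?_⟩; intro a ha; trivial)
        | (refine ⟨by omega, ?_⟩; intro a ha; omega)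
        | (refine ⟨by omega, ?_⟩; intro a ha; push_cast; omega)
        | rfl
    · simp [hvlt, hvn, hvp, le_min_iff, (by omega : ¬ v ≤ p), (by omega : (1:Nat) ≤ m + 1)]
      all_goals first
        | (refine ⟨trivial, ?_⟩; intro a ha; trivial)
        | (refine ⟨by omega, ?_⟩; intro a ha; omega)
        | (refine ⟨by omega, ?_⟩; intro a ha; push_cast; omega)
        | omega
        | (apply List.map_congr_left; intro z _; push_cast; omega)
        | (refine ⟨by omega, ?_⟩
           apply List.map_congr_left; intro z _; push_cast; omega)
        | (refine ⟨by omega, by omega, ?_⟩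
           apply List.map_congr_left; intro z _; push_cast; omega)
        | (push_cast; omega)
        | (refine ⟨trivial, ?_⟩; intro a ha; trivial)
        | (refine ⟨by omega, ?_⟩; intro a ha; omega)
        | (refine ⟨by omega, ?_⟩; intro a ha; push_cast; omega)
        | rfl
    · simp [hvlt, hvn, hvp, le_min_iff, (by omega : ¬ v ≤ p), (by omega : (1:Nat) ≤ m + 1)]
      all_goals first
        | (refine ⟨trivial, ?_⟩; intro a ha; trivial)
        | (refine ⟨by omega, ?_⟩; intro a ha; omega)
        | (refine ⟨by omega, ?_⟩; intro a ha; push_cast; omega)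
        | omega
        | (apply List.map_congr_left; intro z _; push_cast; omega)
        | (refine ⟨by omega, ?_⟩
           apply List.map_congr_left; intro z _; push_cast; omega)
        | (refine ⟨by omega, by omega, ?_⟩
           apply List.map_congr_left; intro z _; push_cast; omega)
        | (push_cast; omega)
        | (refine ⟨trivial, ?_⟩; intro a ha; trivial)
        | (refine ⟨by omega, ?_⟩; intro a ha; omega)
        | (refine ⟨by omega, ?_⟩; intro a ha; push_cast; omega)
        | rfl

-- ---- loopB equals specList ----

lemma loopB_some_aux : ∀ (N : Nat) (ys : List Int), ys.length ≤ N →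
    ∀ (p pos : Int) (acc : List Int), (∀ x, ys.head? = some x → x ≠ p) →
    loopB (some p) pos acc ys = acc ++ (specList (p :: ys)).map (· + (pos - 1)) := by
  intro N
  induction N with
  | zero =>
    intro ys hlen p pos acc _
    match ys, hlen with
    | [], _ => simp [loopB, specList]
  | succ N ih =>
    intro ys hlen p pos acc hhead
    match ys with
    | [] => simp [loopB, specList]
    | v :: t =>
      have hvp : v ≠ p := hhead v rfl
      rw [loopB]
      set k := (splitRunAux v t).1 with hk
      set r := (splitRunAux v t).2 with hr
      have hdec : t = List.replicate k v ++ r := splitRunAux_decompose v t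
      have hrh : ∀ x, r.head? = some x → x ≠ v := splitRunAux_head v t
      have hrlen : r.length ≤ N := by
        have h1 := splitRunAux_length v t
        simp only [List.length_cons] at hlen
        rw [← hr] at h1
        omega
      have hrec := ih r hrlen v (pos + ((k : Int) + 1))
        (emitEnd v pos k r (emitStart (some p) v pos k r acc)) hrh
      rw [hrec]
      have hys : v :: t = List.replicate (k+1) v ++ r := by
        rw [hdec]; simp [List.replicate_succ]
      clear hrec ih hdec hlen hhead hk hr
      match r, hrh with
      | [], _ =>
        rw [hys]
        simp only [List.append_nil]
        rw [runSpecLeftNil k v p hvp]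
        rw [show specList [v] = [] from rfl]
        simp only [List.map_nil, List.append_nil, emitStart, emitEnd]
        by_cases hvlt : v < p <;> by_cases hk1 : 1 ≤ k
        · simp [hvlt, hk1, (by omega : (1:Int) < (k:Int) + 1), (by omega : 0 < k)]
          all_goals first
            | (refine ⟨trivial, ?_⟩; intro a ha; trivial)
            | (refine ⟨by omega, ?_⟩; intro a ha; omega)
            | (refine ⟨by omega, ?_⟩; intro a ha; push_cast; omega)
            | omega
            | (apply List.map_congr_left; intro z _; push_cast; omega)
            | (refine ⟨by omega, ?_⟩
               apply List.map_congr_left; intro z _; push_cast; omega)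
            | (refine ⟨by omega, by omega, ?_⟩
               apply List.map_congr_left; intro z _; push_cast; omega)
            | (push_cast; omega)
            | (refine ⟨trivial, ?_⟩; intro a ha; trivial)
            | (refine ⟨by omega, ?_⟩; intro a ha; omega)
            | (refine ⟨by omega, ?_⟩; intro a ha; push_cast; omega)
            | rfl
        · simp [hvlt, hk1, (by omega : k = 0)]
          all_goals first
            | (refine ⟨trivial, ?_⟩; intro a ha; trivial)
            | (refine ⟨by omega, ?_⟩; intro a ha; omega)
            | (refine ⟨by omega, ?_⟩; intro a ha; push_cast; omega)
            | omega
            | (apply List.map_congr_left; intro z _; push_cast; omega)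
            | (refine ⟨by omega, ?_⟩
               apply List.map_congr_left; intro z _; push_cast; omega)
            | (refine ⟨by omega, by omega, ?_⟩
               apply List.map_congr_left; intro z _; push_cast; omega)
            | (push_cast; omega)
            | (refine ⟨trivial, ?_⟩; intro a ha; trivial)
            | (refine ⟨by omega, ?_⟩; intro a ha; omega)
            | (refine ⟨by omega, ?_⟩; intro a ha; push_cast; omega)
            | rfl
        · simp [hvlt, hk1, (by omega : (1:Int) < (k:Int) + 1), (by omega : 0 < k)]
          all_goals first
            | (refine ⟨trivial, ?_⟩; intro a ha; trivial)
            | (refine ⟨by omega, ?_⟩; intro a ha; omega)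
            | (refine ⟨by omega, ?_⟩; intro a ha; push_cast; omega)
            | omega
            | (apply List.map_congr_left; intro z _; push_cast; omega)
            | (refine ⟨by omega, ?_⟩
               apply List.map_congr_left; intro z _; push_cast; omega)
            | (refine ⟨by omega, by omega, ?_⟩
               apply List.map_congr_left; intro z _; push_cast; omega)
            | (push_cast; omega)
            | (refine ⟨trivial, ?_⟩; intro a ha; trivial)
            | (refine ⟨by omega, ?_⟩; intro a ha; omega)
            | (refine ⟨by omega, ?_⟩; intro a ha; push_cast; omega)
            | rfl
        · simp [hvlt, hk1, (by omega : k = 0)]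
          all_goals first
            | (refine ⟨trivial, ?_⟩; intro a ha; trivial)
            | (refine ⟨by omega, ?_⟩; intro a ha; omega)
            | (refine ⟨by omega, ?_⟩; intro a ha; push_cast; omega)
            | omega
            | (apply List.map_congr_left; intro z _; push_cast; omega)
            | (refine ⟨by omega, ?_⟩
               apply List.map_congr_left; intro z _; push_cast; omega)
            | (refine ⟨by omega, by omega, ?_⟩
               apply List.map_congr_left; intro z _; push_cast; omega)
            | (push_cast; omega)
            | (refine ⟨trivial, ?_⟩; intro a ha; trivial)
            | (refine ⟨by omega, ?_⟩; intro a ha; omega)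
            | (refine ⟨by omega, ?_⟩; intro a ha; push_cast; omega)
            | rfl
      | n :: t', hrh' =>
        have hnv : n ≠ v := hrh' n rfl
        rw [hys, runSpecLeft k v p n t' hvp hnv]
        rw [List.map_append, List.map_append, map_shift]
        simp only [emitStart, emitEnd]
        by_cases hvlt : v < p <;> by_cases hk1 : 1 ≤ k <;> by_cases hvn : v < n
        · simp [hvlt, hk1, hvn, (by omega : (1:Int) < (k:Int) + 1), (by omega : 0 < k)]
          all_goals first
            | (refine ⟨trivial, ?_⟩; intro a ha; trivial)
            | (refine ⟨by omega, ?_⟩; intro a ha; omega)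
            | (refine ⟨by omega, ?_⟩; intro a ha; push_cast; omega)
            | omega
            | (apply List.map_congr_left; intro z _; push_cast; omega)
            | (refine ⟨by omega, ?_⟩
               apply List.map_congr_left; intro z _; push_cast; omega)
            | (refine ⟨by omega, by omega, ?_⟩
               apply List.map_congr_left; intro z _; push_cast; omega)
            | (push_cast; omega)
            | (refine ⟨trivial, ?_⟩; intro a ha; trivial)
            | (refine ⟨by omega, ?_⟩; intro a ha; omega)
            | (refine ⟨by omega, ?_⟩; intro a ha; push_cast; omega)
            | rfl
        · simp [hvlt, hk1, hvn, (by omega : (1:Int) < (k:Int) + 1), (by omega : 0 < k)]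
          all_goals first
            | (refine ⟨trivial, ?_⟩; intro a ha; trivial)
            | (refine ⟨by omega, ?_⟩; intro a ha; omega)
            | (refine ⟨by omega, ?_⟩; intro a ha; push_cast; omega)
            | omega
            | (apply List.map_congr_left; intro z _; push_cast; omega)
            | (refine ⟨by omega, ?_⟩
               apply List.map_congr_left; intro z _; push_cast; omega)
            | (refine ⟨by omega, by omega, ?_⟩
               apply List.map_congr_left; intro z _; push_cast; omega)
            | (push_cast; omega)
            | (refine ⟨trivial, ?_⟩; intro a ha; trivial)
            | (refine ⟨by omega, ?_⟩; intro a ha; omega)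
            | (refine ⟨by omega, ?_⟩; intro a ha; push_cast; omega)
            | rfl
        · simp [hvlt, hk1, hvn, (by omega : k = 0)]
          all_goals first
            | (refine ⟨trivial, ?_⟩; intro a ha; trivial)
            | (refine ⟨by omega, ?_⟩; intro a ha; omega)
            | (refine ⟨by omega, ?_⟩; intro a ha; push_cast; omega)
            | omega
            | (apply List.map_congr_left; intro z _; push_cast; omega)
            | (refine ⟨by omega, ?_⟩
               apply List.map_congr_left; intro z _; push_cast; omega)
            | (refine ⟨by omega, by omega, ?_⟩
               apply List.map_congr_left; intro z _; push_cast; omega)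
            | (push_cast; omega)
            | (refine ⟨trivial, ?_⟩; intro a ha; trivial)
            | (refine ⟨by omega, ?_⟩; intro a ha; omega)
            | (refine ⟨by omega, ?_⟩; intro a ha; push_cast; omega)
            | rfl
        · simp [hvlt, hk1, hvn, (by omega : k = 0)]
          all_goals first
            | (refine ⟨trivial, ?_⟩; intro a ha; trivial)
            | (refine ⟨by omega, ?_⟩; intro a ha; omega)
            | (refine ⟨by omega, ?_⟩; intro a ha; push_cast; omega)
            | omega
            | (apply List.map_congr_left; intro z _; push_cast; omega)
            | (refine ⟨by omega, ?_⟩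
               apply List.map_congr_left; intro z _; push_cast; omega)
            | (refine ⟨by omega, by omega, ?_⟩
               apply List.map_congr_left; intro z _; push_cast; omega)
            | (push_cast; omega)
            | (refine ⟨trivial, ?_⟩; intro a ha; trivial)
            | (refine ⟨by omega, ?_⟩; intro a ha; omega)
            | (refine ⟨by omega, ?_⟩; intro a ha; push_cast; omega)
            | rfl
        · simp [hvlt, hk1, hvn, (by omega : (1:Int) < (k:Int) + 1), (by omega : 0 < k)]
          all_goals first
            | (refine ⟨trivial, ?_⟩; intro a ha; trivial)
            | (refine ⟨by omega, ?_⟩; intro a ha; omega)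
            | (refine ⟨by omega, ?_⟩; intro a ha; push_cast; omega)
            | omega
            | (apply List.map_congr_left; intro z _; push_cast; omega)
            | (refine ⟨by omega, ?_⟩
               apply List.map_congr_left; intro z _; push_cast; omega)
            | (refine ⟨by omega, by omega, ?_⟩
               apply List.map_congr_left; intro z _; push_cast; omega)
            | (push_cast; omega)
            | (refine ⟨trivial, ?_⟩; intro a ha; trivial)
            | (refine ⟨by omega, ?_⟩; intro a ha; omega)
            | (refine ⟨by omega, ?_⟩; intro a ha; push_cast; omega)
            | rfl
        · simp [hvlt, hk1, hvn, (by omega : (1:Int) < (k:Int) + 1), (by omega : 0 < k)]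
          all_goals first
            | (refine ⟨trivial, ?_⟩; intro a ha; trivial)
            | (refine ⟨by omega, ?_⟩; intro a ha; omega)
            | (refine ⟨by omega, ?_⟩; intro a ha; push_cast; omega)
            | omega
            | (apply List.map_congr_left; intro z _; push_cast; omega)
            | (refine ⟨by omega, ?_⟩
               apply List.map_congr_left; intro z _; push_cast; omega)
            | (refine ⟨by omega, by omega, ?_⟩
               apply List.map_congr_left; intro z _; push_cast; omega)
            | (push_cast; omega)
            | (refine ⟨trivial, ?_⟩; intro a ha; trivial)
            | (refine ⟨by omega, ?_⟩; intro a ha; omega)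
            | (refine ⟨by omega, ?_⟩; intro a ha; push_cast; omega)
            | rfl
        · simp [hvlt, hk1, hvn, (by omega : k = 0)]
          all_goals first
            | (refine ⟨trivial, ?_⟩; intro a ha; trivial)
            | (refine ⟨by omega, ?_⟩; intro a ha; omega)
            | (refine ⟨by omega, ?_⟩; intro a ha; push_cast; omega)
            | omega
            | (apply List.map_congr_left; intro z _; push_cast; omega)
            | (refine ⟨by omega, ?_⟩
               apply List.map_congr_left; intro z _; push_cast; omega)
            | (refine ⟨by omega, by omega, ?_⟩
               apply List.map_congr_left; intro z _; push_cast; omega)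
            | (push_cast; omega)
            | (refine ⟨trivial, ?_⟩; intro a ha; trivial)
            | (refine ⟨by omega, ?_⟩; intro a ha; omega)
            | (refine ⟨by omega, ?_⟩; intro a ha; push_cast; omega)
            | rfl
        · simp [hvlt, hk1, hvn, (by omega : k = 0)]
          all_goals first
            | (refine ⟨trivial, ?_⟩; intro a ha; trivial)
            | (refine ⟨by omega, ?_⟩; intro a ha; omega)
            | (refine ⟨by omega, ?_⟩; intro a ha; push_cast; omega)
            | omega
            | (apply List.map_congr_left; intro z _; push_cast; omega)
            | (refine ⟨by omega, ?_⟩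
               apply List.map_congr_left; intro z _; push_cast; omega)
            | (refine ⟨by omega, by omega, ?_⟩
               apply List.map_congr_left; intro z _; push_cast; omega)
            | (push_cast; omega)
            | (refine ⟨trivial, ?_⟩; intro a ha; trivial)
            | (refine ⟨by omega, ?_⟩; intro a ha; omega)
            | (refine ⟨by omega, ?_⟩; intro a ha; push_cast; omega)
            | rfl

lemma loopB_none (ys : List Int) (pos : Int) (acc : List Int) :
    loopB none pos acc ys = acc ++ (specList ys).map (· + pos) := by
  match ys with
  | [] => simp [loopB, specList]
  | v :: t =>
    rw [loopB]
    set k := (splitRunAux v t).1 with hk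
    set r := (splitRunAux v t).2 with hr
    have hdec : t = List.replicate k v ++ r := splitRunAux_decompose v t
    have hrh : ∀ x, r.head? = some x → x ≠ v := splitRunAux_head v t
    have hrec := loopB_some_aux r.length r le_rfl v (pos + ((k : Int) + 1))
      (emitEnd v pos k r (emitStart none v pos k r acc)) hrh
    rw [hrec]
    have hys : v :: t = List.replicate (k+1) v ++ r := by
      rw [hdec]; simp [List.replicate_succ]
    clear hrec hdec hk hr
    match r, hrh with
    | [], _ =>
      rw [hys]
      simp only [List.append_nil]
      rw [specList_replicate (k+1) v, show specList [v] = [] from rfl]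
      simp [emitStart, emitEnd]
    | n :: t', hrh' =>
      have hnv : n ≠ v := hrh' n rfl
      rw [hys, runSpecTop k v n t' hnv]
      rw [List.map_append, map_shift]
      simp only [emitStart, emitEnd]
      by_cases hk1 : 1 ≤ k <;> by_cases hvn : v < n
      · simp [hk1, hvn, (by omega : (1:Int) < (k:Int) + 1), (by omega : 0 < k)]
        all_goals first
          | (refine ⟨trivial, ?_⟩; intro a ha; trivial)
          | (refine ⟨by omega, ?_⟩; intro a ha; omega)
          | (refine ⟨by omega, ?_⟩; intro a ha; push_cast; omega)
          | omega
          | (apply List.map_congr_left; intro z _; push_cast; omega)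
          | (refine ⟨by omega, ?_⟩
             apply List.map_congr_left; intro z _; push_cast; omega)
          | (refine ⟨by omega, by omega, ?_⟩
             apply List.map_congr_left; intro z _; push_cast; omega)
          | (push_cast; omega)
          | (refine ⟨trivial, ?_⟩; intro a ha; trivial)
          | (refine ⟨by omega, ?_⟩; intro a ha; omega)
          | (refine ⟨by omega, ?_⟩; intro a ha; push_cast; omega)
          | rfl
      · simp [hk1, hvn, (by omega : (1:Int) < (k:Int) + 1), (by omega : 0 < k)]
        all_goals first
          | (refine ⟨trivial, ?_⟩; intro a ha; trivial)
          | (refine ⟨by omega, ?_⟩; intro a ha; omega)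
          | (refine ⟨by omega, ?_⟩; intro a ha; push_cast; omega)
          | omega
          | (apply List.map_congr_left; intro z _; push_cast; omega)
          | (refine ⟨by omega, ?_⟩
             apply List.map_congr_left; intro z _; push_cast; omega)
          | (refine ⟨by omega, by omega, ?_⟩
             apply List.map_congr_left; intro z _; push_cast; omega)
          | (push_cast; omega)
          | (refine ⟨trivial, ?_⟩; intro a ha; trivial)
          | (refine ⟨by omega, ?_⟩; intro a ha; omega)
          | (refine ⟨by omega, ?_⟩; intro a ha; push_cast; omega)
          | rfl
      · simp [hk1, hvn, (by omega : k = 0)]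
        all_goals first
          | (refine ⟨trivial, ?_⟩; intro a ha; trivial)
          | (refine ⟨by omega, ?_⟩; intro a ha; omega)
          | (refine ⟨by omega, ?_⟩; intro a ha; push_cast; omega)
          | omega
          | (apply List.map_congr_left; intro z _; push_cast; omega)
          | (refine ⟨by omega, ?_⟩
             apply List.map_congr_left; intro z _; push_cast; omega)
          | (refine ⟨by omega, by omega, ?_⟩
             apply List.map_congr_left; intro z _; push_cast; omega)
          | (push_cast; omega)
          | (refine ⟨trivial, ?_⟩; intro a ha; trivial)
          | (refine ⟨by omega, ?_⟩; intro a ha; omega)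
          | (refine ⟨by omega, ?_⟩; intro a ha; push_cast; omega)
          | rfl
      · simp [hk1, hvn, (by omega : k = 0)]
        all_goals first
          | (refine ⟨trivial, ?_⟩; intro a ha; trivial)
          | (refine ⟨by omega, ?_⟩; intro a ha; omega)
          | (refine ⟨by omega, ?_⟩; intro a ha; push_cast; omega)
          | omega
          | (apply List.map_congr_left; intro z _; push_cast; omega)
          | (refine ⟨by omega, ?_⟩
             apply List.map_congr_left; intro z _; push_cast; omega)
          | (refine ⟨by omega, by omega, ?_⟩
             apply List.map_congr_left; intro z _; push_cast; omega)
          | (push_cast; omega)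
          | (refine ⟨trivial, ?_⟩; intro a ha; trivial)
          | (refine ⟨by omega, ?_⟩; intro a ha; omega)
          | (refine ⟨by omega, ?_⟩; intro a ha; push_cast; omega)
          | rfl

-- ===== VERDICT (by name: the statement is the Claim_ definition above) =====
theorem get_splitter_spec : Claim_equal_get_splitter := by
  intro xs _
  show get_splitter xs = get_splitter_alt xs
  unfold get_splitter get_splitter_alt
  rw [foldl_gA, List.nil_append, A_eq_spec, loopB_none]
  simp
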